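-- pv_equiv track=rewrite | github.com/Kasper-Arfman/konijnenhokken | possible_states.py | find_composable_numbers
-- ===== SOURCE A (Python) =====
-- def find_composable_numbers(scores, limit):
--     # Initialize the DP array
--     dp = [False] * (limit + 1)
--     dp[0] = True  # Base case: 0 can always be formed with no elements
--
--     # Update dp array for each score
--     for score in scores:
--         for j in range(score, limit + 1):
--             if dp[j - score]:
--                 dp[j] = True
--
--     # Extract all numbers that can be formed
--     return [i for i in range(limit) if dp[i]]
-- ===== SOURCE B (Python) =====
-- def find_composable_numbers(scores, limit):
--     # Target-major DP: one ascending pass over targets consulting a deduplicated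
--     # set of positive step sizes; the result list is emitted directly in order.
--     steps = {s for s in scores if s > 0}
--     reach = [False] * max(limit, 0)
--     result = []
--     for n in range(limit):
--         if n == 0 or any(s <= n and reach[n - s] for s in steps):
--             reach[n] = True
--             result.append(n)
--     return result
-- ===== Notes on version B (the rewrite author's own statement) =====
-- stated objective: faster
-- what changed: A's score-major DP (outer loop over every score, inner ascending scan mutating a shared dp array, then an extraction pass) is replaced by a single target-major pass: for each target n in ascending order B decides reachability from a deduplicated set of positive steps by consulting previously decided targets, emitting the result list directly.
import Mathlib
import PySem

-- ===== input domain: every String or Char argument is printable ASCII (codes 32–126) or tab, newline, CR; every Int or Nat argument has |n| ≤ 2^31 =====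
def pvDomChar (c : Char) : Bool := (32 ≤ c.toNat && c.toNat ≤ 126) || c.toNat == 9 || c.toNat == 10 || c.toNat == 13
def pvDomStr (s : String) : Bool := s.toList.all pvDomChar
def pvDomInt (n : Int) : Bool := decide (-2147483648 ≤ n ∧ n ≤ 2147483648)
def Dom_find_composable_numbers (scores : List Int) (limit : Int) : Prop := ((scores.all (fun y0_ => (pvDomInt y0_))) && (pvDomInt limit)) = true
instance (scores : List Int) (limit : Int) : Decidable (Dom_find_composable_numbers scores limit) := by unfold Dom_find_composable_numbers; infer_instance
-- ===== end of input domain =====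

-- B replaces A's score-major in-place DP (nested loops per score) by a single target-major
-- pass over a deduplicated set of positive steps, emitting the result directly
-- (objective: faster — B scans the array once per distinct positive score, A once per score).

-- ===== PORT A =====
def find_composable_numbers (scores : List Int) (limit : Int) : List Int :=
  -- dp = [False] * (limit + 1); dp[0] = True   (the IndexError on an empty dp lies outside Pre_)
  let dp0 := (List.replicate (limit + 1).toNat false).set 0 true
  -- for score in scores: for j in range(score, limit + 1): if dp[j - score]: dp[j] = True
  let dp := scores.foldl (fun dp score =>
      (PySem.List.pyRange score (limit + 1) 1).foldl (fun dp j =>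
        if PySem.List.pyGetD dp (j - score) false then PySem.List.pySetD dp j true else dp) dp) dp0
  -- [i for i in range(limit) if dp[i]]
  (PySem.List.pyRange 0 limit 1).filter (fun i => PySem.List.pyGetD dp i false)

-- ===== PORT B =====
def find_composable_numbers_alt (scores : List Int) (limit : Int) : List Int :=
  -- steps = {s for s in scores if s > 0}
  let steps : PySem.Set Int := PySem.Set.ofList (scores.filter (fun s => decide (0 < s)))
  -- reach = [False] * max(limit, 0); result = []
  -- for n in range(limit): if n == 0 or any(s <= n and reach[n - s] for s in steps): reach[n] = True; result.append(n)
  let st := (PySem.List.pyRange 0 limit 1).foldl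
      (fun (st : List Bool × List Int) n =>
        if (n == 0) || steps.any (fun s => decide (s ≤ n) && PySem.List.pyGetD st.1 (n - s) false)
        then (PySem.List.pySetD st.1 n true, st.2 ++ [n])
        else st)
      (List.replicate (max limit 0).toNat false, ([] : List Int))
  st.2

-- ===== PRECONDITION & SPEC =====
-- Pre_ admits exactly the inputs on which A returns: A raises IndexError for limit < 0
-- (dp is empty at dp[0] = True) and for any negative score (dp[j - score] overruns the array).
def Pre_find_composable_numbers (scores : List Int) (limit : Int) : Prop :=
  0 ≤ limit ∧ ∀ s ∈ scores, 0 ≤ s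
instance (scores : List Int) (limit : Int) : Decidable (Pre_find_composable_numbers scores limit) := by
  unfold Pre_find_composable_numbers; infer_instance
def pvWitness_find_composable_numbers : List Int × Int := ([1, 2, 5], 8)

def Spec_find_composable_numbers (scores : List Int) (limit : Int) (out : List Int) : Prop := out = find_composable_numbers_alt scores limit
instance (scores : List Int) (limit : Int) (out : List Int) : Decidable (Spec_find_composable_numbers scores limit out) := by unfold Spec_find_composable_numbers; infer_instance

-- ===== CLAIM (what is proved, stated in full; the proofs are below) =====
def Claim_equal_find_composable_numbers : Prop := ∀ (scores : List Int) (limit : Int), Dom_find_composable_numbers scores limit → Pre_find_composable_numbers scores limit → Spec_find_composable_numbers scores limit (find_composable_numbers scores limit)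

-- ===== LEMMAS AND PROOFS =====

-- n is a sum of finitely many (not necessarily distinct) elements of S.
inductive PvReach : List Int → Int → Prop
  | zero (S : List Int) : PvReach S 0
  | step {S : List Int} {v : Int} (s : Int) (hs : s ∈ S) (hv : PvReach S v) : PvReach S (v + s)

theorem pvReach_nonneg {S : List Int} {n : Int} (hS : ∀ s ∈ S, 0 ≤ s) (h : PvReach S n) : 0 ≤ n := by
  induction h with
  | zero => omega
  | step s hs hv ih => have := hS s hs; omega

theorem pvReach_mono {S T : List Int} {n : Int} (hST : ∀ s, s ∈ S → s ∈ T) (h : PvReach S n) :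
    PvReach T n := by
  induction h with
  | zero => exact .zero T
  | step s hs hv ih => exact .step s (hST s hs) ih

theorem pvReach_congr {S T : List Int} (hS : ∀ s ∈ S, 0 ≤ s)
    (hT : ∀ x : Int, x ∈ T ↔ x ∈ S ∧ 0 < x) {n : Int} : PvReach S n ↔ PvReach T n := by
  constructor
  · intro h
    induction h with
    | zero => exact .zero T
    | step s hs hv ih =>
      by_cases h0 : 0 < s
      · exact .step s ((hT s).2 ⟨hs, h0⟩) ih
      · have : s = 0 := by have := hS s hs; omega
        simpa [this] using ih
  · exact pvReach_mono (fun x hx => ((hT x).1 hx).1)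

theorem pvReach_char {T : List Int} (hT : ∀ s ∈ T, 0 < s) (n : Int) :
    PvReach T n ↔ n = 0 ∨ ∃ s ∈ T, s ≤ n ∧ PvReach T (n - s) := by
  constructor
  · intro h
    cases h with
    | zero => exact Or.inl rfl
    | step s hs hv =>
      refine Or.inr ⟨s, hs, ?_, by simpa using hv⟩
      have h1 := pvReach_nonneg (fun x hx => le_of_lt (hT x hx)) hv
      omega
  · rintro (rfl | ⟨s, hs, hle, hr⟩)
    · exact .zero T
    · have := PvReach.step s hs hr
      simpa using this

theorem pvReach_append {P : List Int} {s : Int} (n : Int) :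
    PvReach (P ++ [s]) n ↔ ∃ k : Nat, PvReach P (n - k * s) := by
  constructor
  · intro h
    induction h with
    | zero => exact ⟨0, by simpa using PvReach.zero P⟩
    | step t ht hv ih =>
      obtain ⟨k, hk⟩ := ih
      rcases List.mem_append.1 ht with htP | hts
      · refine ⟨k, ?_⟩
        have h2 := PvReach.step t htP hk
        convert h2 using 1
        ring
      · have : t = s := by simpa using hts
        subst this
        refine ⟨k + 1, ?_⟩
        convert hk using 1
        push_cast
        ring
  · rintro ⟨k, hk⟩
    induction k generalizing n with
    | zero => exact pvReach_mono (fun x hx => List.mem_append.2 (Or.inl hx)) (by simpa using hk)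
    | succ k ih =>
      have hk' : PvReach P (n - s - (k : Int) * s) := by
        have : n - s - (k : Int) * s = n - ((k : Nat) + 1 : Nat) * s := by push_cast; ring
        rw [this]; exact hk
      have h1 := ih (n - s) hk'
      have h2 := PvReach.step s (List.mem_append.2 (Or.inr (by simp))) h1
      simpa using h2

-- Inner-loop invariant for A: after processing j ∈ range(s, s + t), dp[i] holds iff
-- some number of copies of s can be removed from i to land on an already-reachable value,
-- where a positive number of copies is only allowed once i has been processed (i < s + t).
theorem pvInner_inv {P : List Int} (hP : ∀ x ∈ P, 0 ≤ x) {s : Int} (hs : 0 ≤ s)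
    {limit : Int} (hl : 0 ≤ limit) {dp : List Bool}
    (hlen : dp.length = (limit + 1).toNat)
    (hdp : ∀ i : Nat, (i : Int) ≤ limit → (dp.getD i false = true ↔ PvReach P i))
    (t : Nat) (ht : s + t ≤ limit + 1) :
    ((PySem.List.pyRange s (s + t) 1).foldl
        (fun dp j => if PySem.List.pyGetD dp (j - s) false then PySem.List.pySetD dp j true else dp)
          dp).length = (limit + 1).toNat ∧
    ∀ i : Nat, (i : Int) ≤ limit →
      (((PySem.List.pyRange s (s + t) 1).foldl
        (fun dp j => if PySem.List.pyGetD dp (j - s) false then PySem.List.pySetD dp j true else dp)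
          dp).getD i false = true ↔
        ∃ k : Nat, PvReach P ((i : Int) - k * s) ∧ (k = 0 ∨ (i : Int) < s + t)) := by
  induction t with
  | zero =>
    rw [show s + ((0 : Nat) : Int) = s by omega, PySem.List.pyRange_one_eq_nil (le_refl s)]
    simp only [List.foldl_nil]
    refine ⟨hlen, fun i hi => ?_⟩
    rw [hdp i hi]
    constructor
    · intro h; exact ⟨0, by simpa using h, Or.inl rfl⟩
    · rintro ⟨k, hk, hc⟩
      by_cases hk0 : k = 0
      · subst hk0; simpa using hk
      · exfalso
        rcases hc with hc | hc
        · exact hk0 hc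
        · have hnn := pvReach_nonneg hP hk
          have h1 : (1 : Int) ≤ (k : Int) := by exact_mod_cast Nat.one_le_iff_ne_zero.2 hk0
          have h2 : s ≤ (k : Int) * s := by nlinarith
          omega
  | succ t ih =>
    have ht' : s + (t : Int) ≤ limit + 1 := by push_cast at ht ⊢; omega
    have hb : s + ((t : Nat) : Int) ≤ limit := by push_cast at ht; omega
    obtain ⟨ihlen, ihinv⟩ := ih ht'
    rw [show s + (((t : Nat) + 1 : Nat) : Int) = (s + (t : Int)) + 1 by push_cast; ring,
        PySem.List.pyRange_one_succ_right (by omega), List.foldl_append, List.foldl_cons,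
        List.foldl_nil]
    set dp1 := (PySem.List.pyRange s (s + (t : Int)) 1).foldl
        (fun dp j => if PySem.List.pyGetD dp (j - s) false then PySem.List.pySetD dp j true else dp)
        dp with hdp1
    -- the read dp1[(s+t) - s] = dp1[t]
    have hread : PySem.List.pyGetD dp1 (s + (t : Int) - s) false = dp1.getD t false := by
      rw [show s + (t : Int) - s = ((t : Nat) : Int) by ring]
      simp [PySem.List.pyGetD_natCast]
    have htlim : ((t : Nat) : Int) ≤ limit := by omega
    have hreadiff := ihinv t htlim
    -- uniform characterization of the read value
    have hread2 : dp1.getD t false = true ↔ ∃ k : Nat, 0 < k ∧ PvReach P (s + (t : Int) - k * s) := by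
      rw [hreadiff]
      constructor
      · rintro ⟨k, hk, _⟩
        refine ⟨k + 1, Nat.succ_pos k, ?_⟩
        convert hk using 1; push_cast; ring
      · rintro ⟨k, hk0, hk⟩
        by_cases hs0 : 0 < s
        · refine ⟨k - 1, ?_, Or.inr (by omega)⟩
          convert hk using 1
          have hcast : ((k - 1 : Nat) : Int) = (k : Int) - 1 := by omega
          rw [hcast]; ring
        · have hs' : s = 0 := by omega
          refine ⟨0, ?_, Or.inl rfl⟩
          convert hk using 1
          rw [hs']; push_cast; ring
    have hm : ((s + (t : Int)).toNat : Int) = s + (t : Int) := by omega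
    have hmlt' : (s + (t : Int)).toNat < (limit + 1).toNat := by clear! dp1; omega
    have hmlt : (s + (t : Int)).toNat < dp1.length := by rw [ihlen]; exact hmlt'
    have hnot : ¬ dp1.getD t false = true → ¬ ∃ k : Nat, 0 < k ∧ PvReach P (s + (t : Int) - k * s) := by
      intro h; rw [← hread2]; exact h
    rw [hread]
    by_cases hrd : dp1.getD t false = true
    · rw [if_pos hrd]
      rw [PySem.List.pySetD_of_nonneg dp1 true (by omega)]
      refine ⟨by simpa using ihlen, fun i hi => ?_⟩
      by_cases hieq : (i : Int) = s + (t : Int)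
      · have hieq' : (s + (t : Int)).toNat = i := by omega
        constructor
        · intro _
          obtain ⟨k, hk0, hk⟩ := hread2.1 hrd
          exact ⟨k, by rwa [hieq], Or.inr (by omega)⟩
        · intro _
          rw [List.getD_eq_getElem?_getD, hieq', List.getElem?_set_self (by rw [← hieq'] at *; exact hmlt)]
          rfl
      · have hne : (s + (t : Int)).toNat ≠ i := by omega
        rw [List.getD_eq_getElem?_getD, List.getElem?_set_ne hne, ← List.getD_eq_getElem?_getD,
            ihinv i hi]
        constructor
        · rintro ⟨k, hk, hc⟩; exact ⟨k, hk, by omega⟩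
        · rintro ⟨k, hk, hc⟩; exact ⟨k, hk, by omega⟩
    · rw [if_neg hrd]
      refine ⟨ihlen, fun i hi => ?_⟩
      rw [ihinv i hi]
      by_cases hieq : (i : Int) = s + (t : Int)
      · constructor
        · rintro ⟨k, hk, hc⟩; exact ⟨k, hk, by omega⟩
        · rintro ⟨k, hk, hc⟩
          by_cases hk0 : k = 0
          · exact ⟨k, hk, Or.inl hk0⟩
          · exfalso
            exact hnot hrd ⟨k, Nat.pos_of_ne_zero hk0, by rwa [← hieq]⟩
      · constructor
        · rintro ⟨k, hk, hc⟩; exact ⟨k, hk, by omega⟩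
        · rintro ⟨k, hk, hc⟩; exact ⟨k, hk, by omega⟩

-- Outer loop over the scores: dp comes to model reachability by P ++ scores.
theorem pvOuter_inv (scores : List Int) (P : List Int) (hP : ∀ x ∈ P, 0 ≤ x)
    (hsc : ∀ x ∈ scores, 0 ≤ x) {limit : Int} (hl : 0 ≤ limit) {dp : List Bool}
    (hlen : dp.length = (limit + 1).toNat)
    (hdp : ∀ i : Nat, (i : Int) ≤ limit → (dp.getD i false = true ↔ PvReach P i)) :
    (scores.foldl (fun dp score =>
      (PySem.List.pyRange score (limit + 1) 1).foldl (fun dp j =>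
        if PySem.List.pyGetD dp (j - score) false then PySem.List.pySetD dp j true else dp) dp)
        dp).length = (limit + 1).toNat ∧
    ∀ i : Nat, (i : Int) ≤ limit →
      ((scores.foldl (fun dp score =>
        (PySem.List.pyRange score (limit + 1) 1).foldl (fun dp j =>
          if PySem.List.pyGetD dp (j - score) false then PySem.List.pySetD dp j true else dp) dp)
          dp).getD i false = true ↔ PvReach (P ++ scores) i) := by
  induction scores generalizing P dp with
  | nil => simp only [List.foldl_nil, List.append_nil]; exact ⟨hlen, hdp⟩
  | cons s rest ih =>
    have hs : 0 ≤ s := hsc s (by simp)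
    have hPs : ∀ x ∈ P ++ [s], 0 ≤ x := by
      intro x hx
      rcases List.mem_append.1 hx with h | h
      · exact hP x h
      · rw [List.mem_singleton.1 h]; exact hs
    simp only [List.foldl_cons]
    by_cases hsl : s ≤ limit + 1
    · have hrange : PySem.List.pyRange s (limit + 1) 1 =
          PySem.List.pyRange s (s + ((limit + 1 - s).toNat : Int)) 1 := by congr 1; omega
      obtain ⟨hlen1, hinv1⟩ := pvInner_inv hP hs hl hlen hdp (limit + 1 - s).toNat (by omega)
      rw [hrange]
      have hdp1 : ∀ i : Nat, (i : Int) ≤ limit →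
          (((PySem.List.pyRange s (s + ((limit + 1 - s).toNat : Int)) 1).foldl
            (fun dp j => if PySem.List.pyGetD dp (j - s) false then PySem.List.pySetD dp j true else dp)
            dp).getD i false = true ↔ PvReach (P ++ [s]) i) := by
        intro i hi
        have hlt : (i : Int) < s + ((limit + 1 - s).toNat : Int) := by omega
        rw [hinv1 i hi, pvReach_append (i : Int)]
        constructor
        · rintro ⟨k, hk, _⟩; exact ⟨k, hk⟩
        · rintro ⟨k, hk⟩; exact ⟨k, hk, Or.inr hlt⟩
      have hres := ih (P ++ [s]) hPs (fun x hx => hsc x (List.mem_cons_of_mem _ hx)) hlen1 hdp1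
      simpa [List.append_assoc] using hres
    · rw [PySem.List.pyRange_one_eq_nil (by omega), List.foldl_nil]
      have hdp1 : ∀ i : Nat, (i : Int) ≤ limit →
          (dp.getD i false = true ↔ PvReach (P ++ [s]) i) := by
        intro i hi
        rw [hdp i hi, pvReach_append (i : Int)]
        constructor
        · intro h; exact ⟨0, by simpa using h⟩
        · rintro ⟨k, hk⟩
          by_cases hk0 : k = 0
          · subst hk0; simpa using hk
          · exfalso
            have hnn := pvReach_nonneg hP hk
            have h1 : (1 : Int) ≤ (k : Int) := by exact_mod_cast Nat.one_le_iff_ne_zero.2 hk0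
            have h2 : s ≤ (k : Int) * s := by nlinarith
            omega
      have hres := ih (P ++ [s]) hPs (fun x hx => hsc x (List.mem_cons_of_mem _ hx)) hlen hdp1
      simpa [List.append_assoc] using hres

-- B-side invariant: after processing targets 0 … t-1, reach marks exactly the reachable
-- targets below t and result lists the reachable targets below t in ascending order.
theorem pvB_inv (T : List Int) (hT : ∀ s ∈ T, 0 < s) {limit : Int} (hl : 0 ≤ limit)
    (g : Int → Bool) (hg : ∀ i : Int, g i = true ↔ PvReach T i)
    (t : Nat) (ht : (t : Int) ≤ limit) :
    ((PySem.List.pyRange 0 t 1).foldl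
      (fun (st : List Bool × List Int) n =>
        if (n == 0) || T.any (fun s => decide (s ≤ n) && PySem.List.pyGetD st.1 (n - s) false)
        then (PySem.List.pySetD st.1 n true, st.2 ++ [n])
        else st)
      (List.replicate (max limit 0).toNat false, ([] : List Int))).1.length = (max limit 0).toNat ∧
    (∀ i : Nat, (i : Int) < limit →
      (((PySem.List.pyRange 0 t 1).foldl
        (fun (st : List Bool × List Int) n =>
          if (n == 0) || T.any (fun s => decide (s ≤ n) && PySem.List.pyGetD st.1 (n - s) false)
          then (PySem.List.pySetD st.1 n true, st.2 ++ [n])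
          else st)
        (List.replicate (max limit 0).toNat false, ([] : List Int))).1.getD i false = true ↔
        ((i : Int) < t ∧ PvReach T i))) ∧
    ((PySem.List.pyRange 0 t 1).foldl
      (fun (st : List Bool × List Int) n =>
        if (n == 0) || T.any (fun s => decide (s ≤ n) && PySem.List.pyGetD st.1 (n - s) false)
        then (PySem.List.pySetD st.1 n true, st.2 ++ [n])
        else st)
      (List.replicate (max limit 0).toNat false, ([] : List Int))).2 =
      (PySem.List.pyRange 0 t 1).filter g := by
  induction t with
  | zero =>
    rw [show ((0 : Nat) : Int) = 0 by rfl, PySem.List.pyRange_one_eq_nil (le_refl 0)]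
    simp only [List.foldl_nil, List.filter_nil]
    refine ⟨by simp, fun i hi => ?_, by trivial⟩
    constructor
    · intro h; simp at h
    · rintro ⟨h1, _⟩; omega
  | succ t ih =>
    have htlt : (t : Int) < limit := by push_cast at ht; omega
    obtain ⟨ihlen, ihinv, ihres⟩ := ih (by omega)
    rw [show (((t : Nat) + 1 : Nat) : Int) = ((t : Nat) : Int) + 1 by push_cast; ring,
        PySem.List.pyRange_one_succ_right (by positivity), List.foldl_append, List.foldl_cons,
        List.foldl_nil, List.filter_append]
    set st := (PySem.List.pyRange 0 (t : Int) 1).foldl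
      (fun (st : List Bool × List Int) n =>
        if (n == 0) || T.any (fun s => decide (s ≤ n) && PySem.List.pyGetD st.1 (n - s) false)
        then (PySem.List.pySetD st.1 n true, st.2 ++ [n])
        else st)
      (List.replicate (max limit 0).toNat false, ([] : List Int)) with hst
    have hgetd : ∀ s : Int, s ∈ T → s ≤ (t : Int) →
        (PySem.List.pyGetD st.1 ((t : Int) - s) false = true ↔ PvReach T ((t : Int) - s)) := by
      intro s hsT hle
      have hs0 := hT s hsT
      have h0 : (0 : Int) ≤ (t : Int) - s := by omega
      have hidx : (((t : Int) - s).toNat : Int) = (t : Int) - s := by omega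
      rw [PySem.List.pyGetD_of_nonneg st.1 false h0,
          ihinv ((t : Int) - s).toNat (by omega), hidx]
      constructor
      · rintro ⟨_, h⟩; exact h
      · intro h; exact ⟨by omega, h⟩
    have hcond : (((t : Int) == 0) ||
        T.any (fun s => decide (s ≤ (t : Int)) && PySem.List.pyGetD st.1 ((t : Int) - s) false))
          = true ↔ PvReach T (t : Int) := by
      rw [pvReach_char hT (t : Int)]
      simp only [Bool.or_eq_true, beq_iff_eq, List.any_eq_true, Bool.and_eq_true,
        decide_eq_true_eq]
      constructor
      · rintro (h0 | ⟨s, hsT, hle, hget⟩)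
        · exact Or.inl h0
        · exact Or.inr ⟨s, hsT, hle, (hgetd s hsT hle).1 hget⟩
      · rintro (h0 | ⟨s, hsT, hle, hr⟩)
        · exact Or.inl h0
        · exact Or.inr ⟨s, hsT, hle, (hgetd s hsT hle).2 hr⟩
    have hmem : t < (max limit 0).toNat := by omega
    by_cases hc : (((t : Int) == 0) ||
        T.any (fun s => decide (s ≤ (t : Int)) && PySem.List.pyGetD st.1 ((t : Int) - s) false))
          = true
    · rw [if_pos hc]
      have hr : PvReach T (t : Int) := hcond.1 hc
      refine ⟨?_, fun i hi => ?_, ?_⟩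
      · simp only [PySem.List.pySetD_natCast, List.length_set]
        exact ihlen
      · simp only [PySem.List.pySetD_natCast]
        by_cases hieq : i = t
        · subst hieq
          rw [List.getD_eq_getElem?_getD, List.getElem?_set_self (by rw [ihlen]; exact hmem)]
          simp only [Option.getD_some]
          constructor
          · intro _; exact ⟨by omega, hr⟩
          · intro _; trivial
        · rw [List.getD_eq_getElem?_getD, List.getElem?_set_ne (fun h => hieq h.symm),
              ← List.getD_eq_getElem?_getD, ihinv i hi]
          constructor
          · rintro ⟨h1, h2⟩; exact ⟨by omega, h2⟩
          · rintro ⟨h1, h2⟩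
            refine ⟨?_, h2⟩
            have : (i : Int) ≠ (t : Int) := by exact_mod_cast fun h => hieq (by exact_mod_cast h)
            omega
      · rw [ihres]
        have hg1 : g (t : Int) = true := (hg (t : Int)).2 hr
        simp [hg1]
    · rw [if_neg hc]
      have hr : ¬ PvReach T (t : Int) := fun h => hc (hcond.2 h)
      refine ⟨ihlen, fun i hi => ?_, ?_⟩
      · rw [ihinv i hi]
        by_cases hieq : i = t
        · subst hieq
          constructor
          · rintro ⟨h1, _⟩; omega
          · rintro ⟨_, h2⟩; exact absurd h2 hr
        · constructor
          · rintro ⟨h1, h2⟩; exact ⟨by omega, h2⟩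
          · rintro ⟨h1, h2⟩
            refine ⟨?_, h2⟩
            have : (i : Int) ≠ (t : Int) := by exact_mod_cast fun h => hieq (by exact_mod_cast h)
            omega
      · rw [ihres]
        have hg1 : g (t : Int) = false := by
          cases hgt : g (t : Int)
          · rfl
          · exact absurd ((hg (t : Int)).1 hgt) hr
        simp [hg1]

theorem pvReach_nil {n : Int} : PvReach ([] : List Int) n ↔ n = 0 := by
  constructor
  · intro h
    cases h with
    | zero => rfl
    | step s hs hv => simp at hs
  · rintro rfl; exact .zero []

-- ===== VERDICT (by name: the statement is the Claim_ definition above) =====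
theorem find_composable_numbers_spec : Claim_equal_find_composable_numbers := by
  intro scores limit _ hPre
  obtain ⟨hl, hsc⟩ := hPre
  unfold Spec_find_composable_numbers
  simp only [find_composable_numbers, find_composable_numbers_alt]
  set T := PySem.Set.ofList (scores.filter (fun s => decide (0 < s))) with hTdef
  have hTmem : ∀ x : Int, x ∈ T ↔ x ∈ scores ∧ 0 < x := by
    intro x; rw [hTdef]; simp [PySem.Set.mem_ofList, List.mem_filter]
  have hT : ∀ s ∈ T, 0 < s := fun s hs => ((hTmem s).1 hs).2
  have hRe : ∀ n : Int, PvReach scores n ↔ PvReach T n := fun n => pvReach_congr hsc hTmem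
  set g : Int → Bool := fun i => @decide (PvReach T i) (Classical.propDecidable _) with hgdef
  have hg : ∀ i : Int, g i = true ↔ PvReach T i := by
    intro i
    rw [hgdef]
    exact @decide_eq_true_iff _ (Classical.propDecidable _)
  -- A side: the dp array models reachability
  have hdp0len : ((List.replicate (limit + 1).toNat false).set 0 true).length
      = (limit + 1).toNat := by simp
  have hdp0 : ∀ i : Nat, (i : Int) ≤ limit →
      (((List.replicate (limit + 1).toNat false).set 0 true).getD i false = true ↔
        PvReach ([] : List Int) (i : Int)) := by
    intro i hi
    rw [List.getD_eq_getElem?_getD]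
    by_cases h0 : i = 0
    · subst h0
      rw [List.getElem?_set_self (by simp; omega)]
      simp [pvReach_nil]
    · rw [List.getElem?_set_ne (fun h => h0 h.symm)]
      have hrep : ((List.replicate (limit + 1).toNat false)[i]?).getD false = false := by
        rcases lt_or_ge i (limit + 1).toNat with h | h
        · simp [h]
        · rw [List.getElem?_eq_none (by simpa using h)]; rfl
      rw [hrep]
      simp [pvReach_nil, h0]
  obtain ⟨hAlen, hAinv⟩ := pvOuter_inv scores [] (by simp) hsc hl hdp0len hdp0
  simp only [List.nil_append] at hAinv
  -- B side: the target-major loop produces the filtered range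
  obtain ⟨-, -, hBres⟩ := pvB_inv T hT hl g hg limit.toNat (by omega)
  rw [Int.toNat_of_nonneg hl] at hBres
  rw [hBres]
  apply List.filter_congr
  intro i hmem
  obtain ⟨hi0, hilt⟩ := (PySem.List.mem_pyRange_one).1 hmem
  have hA1 : PySem.List.pyGetD (scores.foldl (fun dp score =>
      (PySem.List.pyRange score (limit + 1) 1).foldl (fun dp j =>
        if PySem.List.pyGetD dp (j - score) false then PySem.List.pySetD dp j true else dp) dp)
      ((List.replicate (limit + 1).toNat false).set 0 true)) i false
      = true ↔ PvReach scores (i : Int) := by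
    rw [PySem.List.pyGetD_of_nonneg _ _ hi0, hAinv i.toNat (by omega),
        Int.toNat_of_nonneg hi0]
  have hBall : g i = true ↔ PvReach scores (i : Int) := by rw [hg i, hRe i]
  have : (PySem.List.pyGetD (scores.foldl (fun dp score =>
      (PySem.List.pyRange score (limit + 1) 1).foldl (fun dp j =>
        if PySem.List.pyGetD dp (j - score) false then PySem.List.pySetD dp j true else dp) dp)
      ((List.replicate (limit + 1).toNat false).set 0 true)) i false = true) ↔ (g i = true) := by
    rw [hA1, hBall]
  exact Bool.coe_iff_coe.1 this
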